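-- pv_equiv track=rewrite | github.com/LiamVT2021/Game-Resources | src/hexGrid/axialGrid.py | getRing
-- ===== SOURCE A (Python) =====
-- def hexAdd(a, b):
--     (ax, az) = a
--     (bx, bz) = b
--     return (ax + bx, az + bz)
--
-- def hexScale(a, d):
--     (x, z) = a
--     return (d * x, d * z)
--
-- axial_directions = [(1, 0), (0, 1), (-1, 1), (-1, 0), (0, -1), (1, -1)]
--
-- def getRing(center, radius):
--     if radius <= 0:
--         return [center]
--     ring = []
--     cur = hexAdd(center, hexScale(axial_directions[4], radius))
--     for i in range(6):
--         Dir = axial_directions[i]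
--         for _j in range(radius):
--             ring.append(cur)
--             cur = hexAdd(cur, Dir)
--     return ring
-- ===== SOURCE B (Python) =====
-- axial_directions = [(1, 0), (0, 1), (-1, 1), (-1, 0), (0, -1), (1, -1)]
--
-- def getRing(center, radius):
--     if radius <= 0:
--         return [center]
--     cx, cz = center
--     return [(cx + px * radius + dx * j, cz + pz * radius + dz * j)
--             for (px, pz), (dx, dz) in zip(axial_directions[4:] + axial_directions[:4],
--                                           axial_directions)
--             for j in range(radius)]
-- ===== Notes on version B (the rewrite author's own statement) =====
-- stated objective: alternative
-- what changed: Replaces the running cursor threaded through both loops with a closed-form comprehension: each side's starting corner is center + radius * previous-direction, and each cell is that corner plus j * side-direction.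
import Mathlib
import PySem

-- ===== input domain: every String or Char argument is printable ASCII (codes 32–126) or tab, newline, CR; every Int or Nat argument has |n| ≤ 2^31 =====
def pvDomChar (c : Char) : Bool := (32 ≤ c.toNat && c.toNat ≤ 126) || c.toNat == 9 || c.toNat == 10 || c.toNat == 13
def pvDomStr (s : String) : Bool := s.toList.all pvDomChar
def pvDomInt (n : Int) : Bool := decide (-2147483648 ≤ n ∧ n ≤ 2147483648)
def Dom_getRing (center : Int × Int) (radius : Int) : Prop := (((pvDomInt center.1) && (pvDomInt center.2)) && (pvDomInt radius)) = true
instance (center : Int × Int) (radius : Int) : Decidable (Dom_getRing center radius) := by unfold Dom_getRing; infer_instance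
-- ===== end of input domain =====

-- B replaces A's running cursor with a closed-form comprehension (corner = center + radius·prev-direction,
-- cell = corner + j·direction); alternative decomposition, same cost, same return value.

-- ===== PORT A =====
def hexAdd (a b : Int × Int) : Int × Int := (a.1 + b.1, a.2 + b.2)

def hexScale (a : Int × Int) (d : Int) : Int × Int := (d * a.1, d * a.2)

def axialDirections : List (Int × Int) := [(1,0),(0,1),(-1,1),(-1,0),(0,-1),(1,-1)]

-- axial_directions[i] for the in-range indices A uses (exact: 0 ≤ i < 6 always in A)
def dirAt (i : Nat) : Int × Int := axialDirections.getD i (0,0)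

-- ring.append(cur): O(1) append encoded as cons onto the reversed accumulator
def getRingStep (Dir : Int × Int) (st : List (Int × Int) × (Int × Int)) :
    List (Int × Int) × (Int × Int) :=
  (st.2 :: st.1, hexAdd st.2 Dir)

def getRing (center : Int × Int) (radius : Int) : List (Int × Int) :=
  if radius ≤ 0 then [center]
  else
    ((List.range 6).foldl
      (fun st i => (List.range radius.toNat).foldl (fun st _ => getRingStep (dirAt i) st) st)
      ([], hexAdd center (hexScale (dirAt 4) radius))).1.reverse

-- ===== PORT B =====
def getRing_alt (center : Int × Int) (radius : Int) : List (Int × Int) :=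
  if radius ≤ 0 then [center]
  else
    (List.zip (axialDirections.drop 4 ++ axialDirections.take 4) axialDirections).flatMap
      (fun pd => (List.range radius.toNat).map (fun (j : Nat) =>
        ((center.1 + pd.1.1 * radius + pd.2.1 * (j : Int),
          center.2 + pd.1.2 * radius + pd.2.2 * (j : Int)) : Int × Int)))

-- ===== PRECONDITION & SPEC =====
def Spec_getRing (center : Int × Int) (radius : Int) (out : List (Int × Int)) : Prop := out = getRing_alt center radius
instance (center : Int × Int) (radius : Int) (out : List (Int × Int)) : Decidable (Spec_getRing center radius out) := by unfold Spec_getRing; infer_instance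

-- ===== CLAIM (what is proved, stated in full; the proofs are below) =====
def Claim_equal_getRing : Prop := ∀ (center : Int × Int) (radius : Int), Dom_getRing center radius → Spec_getRing center radius (getRing center radius)

-- ===== LEMMAS AND PROOFS =====

theorem pvAppCongr {α : Type} {a b c d : List α} (h1 : a = b) (h2 : c = d) :
    a ++ c = b ++ d := by rw [h1, h2]

-- A's inner loop: starting from (acc, cur), after n steps along d it has appended
-- cur, cur+d, …, cur+(n-1)d and the cursor sits at cur + n·d.
theorem getRing_inner (d : Int × Int) (n : Nat) (acc : List (Int × Int)) (cur : Int × Int) :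
    (List.range n).foldl (fun st _ => getRingStep d st) (acc, cur)
    = (((List.range n).map (fun (j : Nat) => ((cur.1 + d.1 * (j : Int), cur.2 + d.2 * (j : Int)) : Int × Int))).reverse ++ acc,
       (cur.1 + d.1 * (n : Int), cur.2 + d.2 * (n : Int))) := by
  induction n with
  | zero => simp
  | succ k ih =>
    rw [List.range_succ, List.foldl_append, ih]
    simp only [List.foldl_cons, List.foldl_nil, getRingStep, hexAdd, List.range_succ,
      List.map_append, List.map_cons, List.map_nil, List.reverse_append, List.reverse_cons,
      List.reverse_nil, List.nil_append, List.cons_append, List.append_assoc, Prod.mk.injEq]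
    refine ⟨by trivial, ?_, ?_⟩ <;> push_cast <;> ring

theorem getRing_eq_alt (center : Int × Int) (radius : Int) :
    getRing center radius = getRing_alt center radius := by
  by_cases hle : radius ≤ 0
  · simp [getRing, getRing_alt, hle]
  · obtain ⟨n, hn⟩ : ∃ n : Nat, radius = (n : Int) :=
      ⟨radius.toNat, (Int.toNat_of_nonneg (le_of_not_ge hle)).symm⟩
    subst hn
    obtain ⟨cx, cz⟩ := center
    rw [getRing, getRing_alt, if_neg hle, if_neg hle]
    simp only [Int.toNat_natCast, hexScale, hexAdd,
      show dirAt 0 = (1,0) from rfl, show dirAt 1 = (0,1) from rfl,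
      show dirAt 2 = (-1,1) from rfl, show dirAt 3 = (-1,0) from rfl,
      show dirAt 4 = (0,-1) from rfl, show dirAt 5 = (1,-1) from rfl,
      show (List.range 6) = [0,1,2,3,4,5] from rfl,
      List.foldl_cons, List.foldl_nil, getRing_inner,
      show (List.zip (axialDirections.drop 4 ++ axialDirections.take 4) axialDirections)
        = [(((0:Int),(-1:Int)),((1:Int),(0:Int))), (((1:Int),(-1:Int)),((0:Int),(1:Int))),
           (((1:Int),(0:Int)),((-1:Int),(1:Int))), (((0:Int),(1:Int)),((-1:Int),(0:Int))),
           (((-1:Int),(1:Int)),((0:Int),(-1:Int))), (((-1:Int),(0:Int)),((1:Int),(-1:Int)))] from rfl,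
      List.flatMap_cons, List.flatMap_nil, List.reverse_append, List.reverse_reverse,
      List.reverse_nil, List.append_nil, List.nil_append, List.append_assoc]
    refine pvAppCongr ?_ (pvAppCongr ?_ (pvAppCongr ?_ (pvAppCongr ?_ (pvAppCongr ?_ ?_)))) <;>
      refine List.map_congr_left (fun j _ => ?_) <;>
      simp only [Prod.mk.injEq] <;> constructor <;> push_cast <;> ring

-- ===== VERDICT (by name: the statement is the Claim_ definition above) =====
theorem getRing_spec : Claim_equal_getRing := by
  intro center radius _
  exact getRing_eq_alt center radius
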